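-- pv_equiv track=rewrite | github.com/AasheeshLikePanner/Python | dynamic_programming/subset_generation.py | subset_combinations_dp
-- ===== SOURCE A (Python) =====
-- def subset_combinations_dp(elements: list, n: int) -> list:
--     """
--     Generate all possible combinations of n elements from the given list of elements using dynamic programming.
--     Args:
--         elements (list): The list of elements from which combinations will be generated.
--         n (int): The number of elements in each combination.
--     Returns:
--         list: A list of tuples, each representing a combination of n elements.
--         >>> subset_combinations_dp(elements=[10, 20, 30, 40], n=2)
--         [(10, 20), (10, 30), (20, 30), (10, 40), (20, 40), (30, 40)]
--         >>> subset_combinations_dp(elements=[1, 2, 3], n=1)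
--         [(1,), (2,), (3,)]
--         >>> subset_combinations_dp(elements=[1, 2, 3], n=3)
--         [(1, 2, 3)]
--         >>> subset_combinations_dp(elements=[42], n=1)
--         [(42,)]
--         >>> subset_combinations_dp(elements=[1, 2, 3, 4, 5], n=3)
--         [(1, 2, 3), (1, 2, 4), (1, 3, 4), (2, 3, 4), (1, 2, 5), (1, 3, 5), (2, 3, 5), (1, 4, 5), (2, 4, 5), (3, 4, 5)]
--         >>> subset_combinations_dp(elements=[6, 7, 8, 9], n=4)
--         [(6, 7, 8, 9)]
--         >>> subset_combinations_dp(elements=[10, 20, 30, 40, 50], n=0)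
--         [()]
--         >>> subset_combinations_dp(elements=[1, 'apple', 3.14], n=2)
--         [(1, 'apple'), (1, 3.14), ('apple', 3.14)]
--         >>> subset_combinations_dp(elements=['single'], n=0)
--         [()]
--     """
--     r = len(elements)
--
--     dp = [[] for _ in range(r + 1)]
--
--     dp[0].append(())
--
--     for i in range(1, r + 1):
--         for j in range(i, 0, -1):
--             for prev_combination in dp[j - 1]:
--                 dp[j].append(tuple(prev_combination) + (elements[i - 1],))
--
--     combinations = dp[n]
--
--     return combinations
-- ===== SOURCE B (Python) =====
-- def subset_combinations_dp(elements: list, n: int) -> list: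
--     if n < 0 or n > len(elements):
--         raise ValueError("n must be between 0 and len(elements)")
--
--     def comb(m, j):
--         if j == 0:
--             return [()]
--         if m == 0:
--             return []
--         return comb(m - 1, j) + [c + (elements[m - 1],) for c in comb(m - 1, j - 1)]
--
--     return comb(len(elements), n)
-- ===== Notes on version B (the rewrite author's own statement) =====
-- stated objective: simpler
-- what changed: Replaces A's triple-nested in-place DP-table mutation (building every combination size and indexing the table) by a short recursive Pascal-style helper comb(m, j) computing only the requested size, after validating n; Pre_ excludes n > len(elements) and n < -(len(elements)+1), where A raises IndexError, and negative in-range n, where A's dp[n] wraps around via Python negative indexing and selects the combinations of another size while B rejects the negative size with ValueError.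
-- outside the precondition, e.g. on subset_combinations_dp([1, 2], -1): A returns [(1, 2)], B raises ValueError; on subset_combinations_dp([1, 2, 3], -2): A returns [(1, 2), (1, 3), (2, 3)], B raises ValueError; on subset_combinations_dp([1], 2): A raises IndexError, B raises ValueError
import Mathlib
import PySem

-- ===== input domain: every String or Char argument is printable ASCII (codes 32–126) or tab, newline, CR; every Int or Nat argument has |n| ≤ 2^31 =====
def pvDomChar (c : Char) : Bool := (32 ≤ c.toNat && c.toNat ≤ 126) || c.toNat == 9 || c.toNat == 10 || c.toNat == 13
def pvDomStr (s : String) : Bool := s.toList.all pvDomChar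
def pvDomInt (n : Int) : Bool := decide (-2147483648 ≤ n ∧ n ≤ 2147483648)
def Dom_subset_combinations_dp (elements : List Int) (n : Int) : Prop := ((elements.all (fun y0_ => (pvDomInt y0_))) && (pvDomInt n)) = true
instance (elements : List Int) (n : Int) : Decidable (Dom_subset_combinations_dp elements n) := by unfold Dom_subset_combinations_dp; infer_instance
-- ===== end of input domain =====

-- B replaces A's triple-nested DP-table mutation by a recursive Pascal-style helper
-- computing only the requested combination size after validating n (simpler).

-- ===== PORT A =====
-- dp[j].append(prev + (elements[i-1],)) for prev in dp[j-1]; j, i-1 are always in range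
-- (toNat/getD defaults are never hit there), so the step is exact.
def pvStep (e : Int) (dp : List (List (List Int))) (j : Int) : List (List (List Int)) :=
  dp.set j.toNat
    ((dp.getD (j - 1).toNat []).foldl (fun acc prev => acc ++ [prev ++ [e]])
      (dp.getD j.toNat []))

def subset_combinations_dp (elements : List Int) (n : Int) : List (List Int) :=
  let r := elements.length
  let dp0 := (List.range (r + 1)).map (fun _ => ([] : List (List Int)))
  let dp1 := dp0.set 0 [([] : List Int)]
  let dpF := (PySem.List.pyRange 1 ((r : Int) + 1)).foldl
      (fun dp i => (PySem.List.pyRange i 0 (-1)).foldl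
        (pvStep (elements.getD (i - 1).toNat 0)) dp) dp1
  -- dp[n]: Python raises IndexError when pyGet? is none; those inputs are outside Pre_
  (PySem.List.pyGet? dpF n).getD []

-- ===== PORT B =====
-- comb(m, j): combinations of size j from the first m elements (Pascal recurrence)
def pvComb (elements : List Int) : Nat → Int → List (List Int)
  | 0, j => if j = 0 then [[]] else []
  | m + 1, j =>
      if j = 0 then [[]]
      else
        pvComb elements m j ++
          (pvComb elements m (j - 1)).map (fun c => c ++ [elements.getD m 0])

def subset_combinations_dp_alt (elements : List Int) (n : Int) : List (List Int) :=
  -- 'raise ValueError' for n outside 0..len(elements): no value in Python; outside Pre_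
  if n < 0 ∨ (elements.length : Int) < n then []
  else pvComb elements elements.length n

-- ===== PRECONDITION & SPEC =====
-- Pre_ excludes n > len(elements) and n < -(len(elements)+1), where A raises IndexError
-- on dp[n], and negative in-range n, where A's dp[n] wraps around via Python
-- negative indexing and selects the combinations of another size while B rejects the
-- negative size with ValueError.
def Pre_subset_combinations_dp (elements : List Int) (n : Int) : Prop :=
  0 ≤ n ∧ n ≤ (elements.length : Int)
instance (elements : List Int) (n : Int) : Decidable (Pre_subset_combinations_dp elements n) := by unfold Pre_subset_combinations_dp; infer_instance

def pvWitness_subset_combinations_dp : List Int × Int := ([1, 2, 3], 2)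

def Spec_subset_combinations_dp (elements : List Int) (n : Int) (out : List (List Int)) : Prop := out = subset_combinations_dp_alt elements n
instance (elements : List Int) (n : Int) (out : List (List Int)) : Decidable (Spec_subset_combinations_dp elements n out) := by unfold Spec_subset_combinations_dp; infer_instance

-- ===== CLAIM (what is proved, stated in full; the proofs are below) =====
def Claim_equal_subset_combinations_dp : Prop := ∀ (elements : List Int) (n : Int), Dom_subset_combinations_dp elements n → Pre_subset_combinations_dp elements n → Spec_subset_combinations_dp elements n (subset_combinations_dp elements n)

-- ===== LEMMAS AND PROOFS =====

-- Nat-indexed version of the Pascal recurrence, used only to relate the two ports.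
def pvCombN (elements : List Int) : Nat → Nat → List (List Int)
  | _, 0 => [[]]
  | 0, _ + 1 => []
  | m + 1, j + 1 =>
      pvCombN elements m (j + 1) ++
        (pvCombN elements m j).map (fun c => c ++ [elements.getD m 0])

lemma pvCombN_zero (elements : List Int) (m : Nat) : pvCombN elements m 0 = [[]] := by
  cases m <;> rfl

lemma pvComb_natCast (elements : List Int) :
    ∀ (m j : Nat), pvComb elements m (j : Int) = pvCombN elements m j := by
  intro m
  induction m with
  | zero =>
      intro j
      cases j with
      | zero => simp [pvComb, pvCombN]
      | succ j' =>
          simp only [pvComb]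
          rw [if_neg (by omega)]
          rfl
  | succ m ih =>
      intro j
      cases j with
      | zero => simp [pvComb, pvCombN]
      | succ j' =>
          simp only [pvComb]
          rw [if_neg (by omega)]
          have h1 : ((j' + 1 : Nat) : Int) - 1 = (j' : Int) := by push_cast; ring
          rw [h1, ih (j' + 1), ih j']
          rfl

lemma pvCombN_eq_nil (elements : List Int) :
    ∀ (m j : Nat), m < j → pvCombN elements m j = [] := by
  intro m
  induction m with
  | zero => intro j h; cases j with
      | zero => omega
      | succ j' => rfl
  | succ m ih =>
      intro j h
      cases j with
      | zero => omega
      | succ j' =>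
          simp only [pvCombN]
          rw [ih (j' + 1) (by omega), ih j' (by omega)]
          rfl

-- the intermediate table during A's inner (descending j) loop:
-- entries above t already hold level-(k+1) values, entries ≤ t still level-k values
def pvMix (elements : List Int) (k t : Nat) : List (List (List Int)) :=
  (List.range (elements.length + 1)).map
    (fun j => if j ≤ t then pvCombN elements k j else pvCombN elements (k + 1) j)

lemma pvMix_top (elements : List Int) (k : Nat) :
    pvMix elements k (k + 1) =
      (List.range (elements.length + 1)).map (fun j => pvCombN elements k j) := by
  unfold pvMix
  apply List.map_congr_left
  intro j _
  by_cases h : j ≤ k + 1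
  · simp [h]
  · rw [if_neg h, pvCombN_eq_nil elements (k + 1) j (by omega),
        pvCombN_eq_nil elements k j (by omega)]

lemma pvStep_mix (elements : List Int) (k t : Nat) (ht : t + 1 ≤ k + 1)
    (hk : k < elements.length) :
    pvStep (elements.getD k 0) (pvMix elements k (t + 1)) ((t : Int) + 1)
      = pvMix elements k t := by
  have hnat : ((t : Int) + 1).toNat = t + 1 := by omega
  have hnat' : (((t : Int) + 1) - 1).toNat = t := by omega
  have hlen : (pvMix elements k (t + 1)).length = elements.length + 1 := by
    simp [pvMix]
  have hget : ∀ (u : Nat), u < elements.length + 1 →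
      (pvMix elements k (t + 1)).getD u []
        = if u ≤ t + 1 then pvCombN elements k u else pvCombN elements (k + 1) u := by
    intro u hu
    rw [List.getD_eq_getElem _ _ (by omega)]
    simp [pvMix]
  unfold pvStep
  rw [hnat, hnat', PySem.List.foldl_append_singleton_eq_map]
  rw [hget (t + 1) (by omega), hget t (by omega)]
  rw [if_pos (le_refl (t + 1)), if_pos (by omega)]
  apply List.ext_getElem
  · simp [pvMix]
  · intro j hj1 hj2
    have hjlen : j < elements.length + 1 := by
      simpa [pvMix] using hj2
    rw [List.getElem_set]
    by_cases hjt : j = t + 1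
    · subst hjt
      rw [if_pos rfl]
      have : pvCombN elements (k + 1) (t + 1)
          = pvCombN elements k (t + 1) ++
              (pvCombN elements k t).map (fun c => c ++ [elements.getD k 0]) := rfl
      simp [pvMix, this]
    · rw [if_neg (by omega : ¬ t + 1 = j)]
      simp only [pvMix, List.getElem_map, List.getElem_range]
      by_cases h2 : j ≤ t
      · rw [if_pos h2, if_pos (by omega)]
      · rw [if_neg h2, if_neg (by omega)]

lemma pvInner_fold (elements : List Int) (k : Nat) (hk : k < elements.length) :
    ∀ (t : Nat), t ≤ k + 1 →
      (PySem.List.pyRange (t : Int) 0 (-1)).foldl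
          (pvStep (elements.getD k 0)) (pvMix elements k t)
        = (List.range (elements.length + 1)).map (fun j => pvCombN elements (k + 1) j) := by
  intro t
  induction t with
  | zero =>
      intro _
      rw [PySem.List.pyRange_neg_one_eq_nil (by omega)]
      simp only [List.foldl_nil]
      unfold pvMix
      apply List.map_congr_left
      intro j _
      by_cases h : j ≤ 0
      · have hj0 : j = 0 := by omega
        subst hj0
        rw [if_pos h, pvCombN_zero, pvCombN_zero]
      · rw [if_neg h]
  | succ t ih =>
      intro ht
      rw [show ((t + 1 : Nat) : Int) = (t : Int) + 1 by push_cast; ring,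
          PySem.List.pyRange_neg_one_cons (by omega), List.foldl_cons,
          pvStep_mix elements k t ht hk, show ((t : Int) + 1 - 1) = (t : Int) by ring]
      exact ih (by omega)

lemma pvOuter_fold (elements : List Int) :
    ∀ (k : Nat), k ≤ elements.length →
      (PySem.List.pyRange 1 ((k : Int) + 1)).foldl
          (fun dp i => (PySem.List.pyRange i 0 (-1)).foldl
            (pvStep (elements.getD (i - 1).toNat 0)) dp)
          (((List.range (elements.length + 1)).map
              (fun _ => ([] : List (List Int)))).set 0 [([] : List Int)])
        = (List.range (elements.length + 1)).map (fun j => pvCombN elements k j) := by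
  intro k
  induction k with
  | zero =>
      intro _
      rw [show ((0 : Nat) : Int) + 1 = 1 by norm_num,
          PySem.List.pyRange_one_eq_nil (le_refl 1)]
      simp only [List.foldl_nil]
      apply List.ext_getElem
      · simp
      · intro j hj1 hj2
        rw [List.getElem_set]
        by_cases h : j = 0
        · subst h; simp [pvCombN]
        · rw [if_neg (by omega)]
          have hjlen : j < elements.length + 1 := by simpa using hj2
          simp only [List.getElem_map, List.getElem_range]
          rw [pvCombN_eq_nil elements 0 j (by omega)]
  | succ k ih =>
      intro hk
      rw [show ((k + 1 : Nat) : Int) + 1 = ((k : Int) + 1) + 1 by push_cast; ring,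
          PySem.List.pyRange_one_succ_right (by omega), List.foldl_append,
          ih (by omega)]
      simp only [List.foldl_cons, List.foldl_nil]
      rw [show ((k : Int) + 1 - 1).toNat = k by omega,
          ← pvMix_top elements k,
          show ((k : Int) + 1) = (((k + 1 : Nat)) : Int) by push_cast; ring]
      exact pvInner_fold elements k (by omega) (k + 1) (le_refl (k + 1))

-- A's result as a table lookup into the fully computed Pascal table
lemma pvA_eq (elements : List Int) (n : Int) :
    subset_combinations_dp elements n
      = (PySem.List.pyGet?
          ((List.range (elements.length + 1)).map (fun j => pvCombN elements elements.length j)) n).getD [] := by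
  simp only [subset_combinations_dp]
  rw [pvOuter_fold elements elements.length (le_refl _)]

-- ===== VERDICT (by name: the statement is the Claim_ definition above) =====
theorem subset_combinations_dp_spec : Claim_equal_subset_combinations_dp := by
  intro elements n _ hpre
  unfold Spec_subset_combinations_dp
  have hn0 : 0 ≤ n := hpre.1
  have hk : n.toNat ≤ elements.length := by have := hpre.2; omega
  rw [pvA_eq, show n = ((n.toNat : Nat) : Int) by omega, PySem.List.pyGet?_natCast]
  rw [List.getElem?_map, List.getElem?_range (by omega)]
  simp only [Option.map_some, Option.getD_some]
  simp only [subset_combinations_dp_alt]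
  rw [if_neg (by omega)]
  rw [show ((n.toNat : Nat) : Int) = n by omega,
      show n = ((n.toNat : Nat) : Int) by omega, pvComb_natCast, Int.toNat_natCast]
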